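-- pv_equiv track=rewrite | github.com/ananthakr1shnan/ResearchMate | src/components/research_assistant.py | _extract_abstract_from_text
-- ===== SOURCE A (Python) =====
-- def _extract_abstract_from_text(text: str) -> str:
--     """Extract abstract from PDF text"""
--     text_lower = text.lower()
--
--     # Look for abstract section
--     abstract_start = text_lower.find('abstract')
--     if abstract_start != -1:
--         # Find the end of abstract (usually next section)
--         abstract_text = text[abstract_start:]
--
--         # Look for common section headers that might follow abstract
--         section_headers = ['introduction', '1. introduction', '1 introduction', 'keywords', 'key words']
--
--         end_pos = len(abstract_text)
--         for header in section_headers: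
--             pos = abstract_text.lower().find(header)
--             if pos != -1 and pos < end_pos:
--                 end_pos = pos
--
--         abstract = abstract_text[:end_pos]
--
--         # Clean up
--         abstract = abstract.replace('abstract', '', 1).strip()
--         if len(abstract) > 1000:
--             abstract = abstract[:1000] + "..."
--
--         return abstract
--
--     return "Abstract not found"
-- ===== SOURCE B (Python) =====
-- def _extract_abstract_from_text(text: str) -> str:
--     """Extract abstract from PDF text"""
--     lower = text.lower()
--     start = lower.find('abstract')
--     if start == -1:
--         return "Abstract not found"
--
--     tail = text[start:]
--     tail_lower = lower[start:]
--
--     # One left-to-right scan: stop at the first position where any section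
--     # header starts (instead of five separate .find passes taking the min).
--     headers = ('introduction', '1. introduction', '1 introduction', 'keywords', 'key words')
--     end = len(tail)
--     for i in range(len(tail_lower)):
--         if tail_lower.startswith(headers, i):
--             end = i
--             break
--
--     abstract = tail[:end].replace('abstract', '', 1).strip()
--     if len(abstract) > 1000:
--         abstract = abstract[:1000] + "..."
--     return abstract
-- ===== Notes on version B (the rewrite author's own statement) =====
-- stated objective: alternative
-- what changed: The end-of-abstract cutoff is computed by one left-to-right scan that stops at the first position where any section header starts (str.startswith with a tuple of headers), instead of five separate .find passes whose minimum is taken; guard, clean-up and truncation are unchanged.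
import Mathlib
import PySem

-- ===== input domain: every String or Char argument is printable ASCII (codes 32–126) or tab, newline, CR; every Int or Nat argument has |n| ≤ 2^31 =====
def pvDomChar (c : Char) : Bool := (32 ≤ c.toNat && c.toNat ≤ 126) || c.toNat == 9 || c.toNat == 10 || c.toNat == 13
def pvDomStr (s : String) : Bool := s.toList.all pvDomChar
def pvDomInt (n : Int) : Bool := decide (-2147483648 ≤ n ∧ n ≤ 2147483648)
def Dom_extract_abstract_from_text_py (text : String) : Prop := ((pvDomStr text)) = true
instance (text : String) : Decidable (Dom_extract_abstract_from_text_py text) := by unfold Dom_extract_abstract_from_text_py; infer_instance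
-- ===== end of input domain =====

-- B replaces A's five separate `.find` scans (min of the hits) by one left-to-right
-- scan that stops at the first position where any header starts; objective: alternative.
-- Guard, clean-up and truncation are identical in both programs.

-- ===== PORT A =====

-- s.replace(old, '', 1): remove the first occurrence of old (old is nonempty here); exact for count=1
def pvRemoveFirst (s old : List Char) : List Char :=
  let p := PySem.Chars.find s old
  if p = -1 then s
  else PySem.List.slice s none (some p) ++ PySem.List.slice s (some (p + (old.length : Int))) none

def pvHeaders : List (List Char) :=
  ["introduction".toList, "1. introduction".toList, "1 introduction".toList,
   "keywords".toList, "key words".toList]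

def extract_abstract_from_text_py (text : String) : String :=
  let t := text.toList
  let text_lower := PySem.Chars.lower t
  let abstract_start := PySem.Chars.find text_lower "abstract".toList
  if abstract_start ≠ -1 then
    let abstract_text := PySem.List.slice t (some abstract_start) none
    let end_pos := pvHeaders.foldl (fun e h =>
        let pos := PySem.Chars.find (PySem.Chars.lower abstract_text) h
        if pos ≠ -1 ∧ pos < e then pos else e) ((abstract_text.length : Int))
    let abstract := PySem.List.slice abstract_text none (some end_pos)
    let abstract := PySem.Chars.strip (pvRemoveFirst abstract "abstract".toList)
    if abstract.length > 1000 then String.ofList (abstract.take 1000 ++ "...".toList)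
    else String.ofList abstract
  else "Abstract not found"

-- ===== PORT B =====

-- index of the first position where some header starts (length of s if none)
def pvScan (headers : List (List Char)) : List Char → Nat
  | [] => 0
  | c :: rest =>
      if headers.any (fun h => PySem.Chars.startswith (c :: rest) h) then 0
      else pvScan headers rest + 1

def extract_abstract_from_text_py_alt (text : String) : String :=
  let lowerAll := PySem.Chars.lower text.toList
  let start := PySem.Chars.find lowerAll "abstract".toList
  if start = -1 then "Abstract not found"
  else
    let tail := PySem.List.slice text.toList (some start) none
    let tailLower := PySem.List.slice lowerAll (some start) none
    let e := pvScan pvHeaders tailLower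
    let abstract := PySem.Chars.strip
      (pvRemoveFirst (PySem.List.slice tail none (some (e : Int))) "abstract".toList)
    if abstract.length > 1000 then String.ofList (abstract.take 1000 ++ "...".toList)
    else String.ofList abstract

-- ===== PRECONDITION & SPEC =====
def Spec_extract_abstract_from_text_py (text : String) (out : String) : Prop := out = extract_abstract_from_text_py_alt text
instance (text : String) (out : String) : Decidable (Spec_extract_abstract_from_text_py text out) := by unfold Spec_extract_abstract_from_text_py; infer_instance

-- ===== CLAIM (what is proved, stated in full; the proofs are below) =====
def Claim_equal_extract_abstract_from_text_py : Prop := ∀ (text : String), Dom_extract_abstract_from_text_py text → Spec_extract_abstract_from_text_py text (extract_abstract_from_text_py text)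

-- ===== LEMMAS AND PROOFS =====

-- "min of finds, treating -1 as len": the value A's foldl-with-min is shown equal to
def pvG (s h : List Char) : Int :=
  if PySem.Chars.find s h = -1 then (s.length : Int) else PySem.Chars.find s h

theorem pvScan_le_length (hs : List (List Char)) (s : List Char) :
    pvScan hs s ≤ s.length := by
  induction s with
  | nil => simp [pvScan]
  | cons c rest ih =>
      simp only [pvScan, List.length_cons]
      split
      · omega
      · omega

theorem pvScan_spec_mem (hs : List (List Char)) (s : List Char) :
    pvScan hs s = s.length ∨ ∃ h ∈ hs, h <+: s.drop (pvScan hs s) := by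
  induction s with
  | nil => left; simp [pvScan]
  | cons c rest ih =>
      by_cases hc : hs.any (fun h => PySem.Chars.startswith (c :: rest) h) = true
      · right
        rcases List.any_eq_true.mp hc with ⟨h, hm, hp⟩
        exact ⟨h, hm, by simpa [pvScan, hc] using (PySem.Chars.startswith_iff _ _).mp hp⟩
      · rcases ih with hlen | ⟨h, hm, hp⟩
        · left; simp [pvScan, hc, hlen]
        · right; exact ⟨h, hm, by simpa [pvScan, hc] using hp⟩

theorem pvScan_min (hs : List (List Char)) (s : List Char) (j : Nat) (h : List Char)
    (hmem : h ∈ hs) (hp : h <+: s.drop j) : pvScan hs s ≤ j := by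
  induction s generalizing j with
  | nil => simp [pvScan]
  | cons c rest ih =>
      by_cases hc : hs.any (fun h => PySem.Chars.startswith (c :: rest) h) = true
      · simp [pvScan, hc]
      · cases j with
        | zero =>
            exfalso
            refine hc (List.any_eq_true.mpr ⟨h, hmem, ?_⟩)
            exact (PySem.Chars.startswith_iff _ _).mpr (by simpa using hp)
        | succ j' =>
            have := ih j' (by simpa using hp)
            simp [pvScan, hc]
            omega

theorem pvFold_eq_minfold (s : List Char) (hs : List (List Char)) :
    ∀ e : Int, e ≤ (s.length : Int) →
    hs.foldl (fun e h =>
        if PySem.Chars.find s h ≠ -1 ∧ PySem.Chars.find s h < e then PySem.Chars.find s h else e) e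
    = hs.foldl (fun e h => min e (pvG s h)) e := by
  induction hs with
  | nil => intro e _; rfl
  | cons h hs ih =>
      intro e he
      have hle := PySem.Chars.find_le_length s h
      have hge := PySem.Chars.neg_one_le_find s h
      have hacc : (if PySem.Chars.find s h ≠ -1 ∧ PySem.Chars.find s h < e
            then PySem.Chars.find s h else e) = min e (pvG s h) := by
        simp only [pvG]
        split_ifs <;> omega
      simp only [List.foldl_cons, hacc]
      exact ih (min e (pvG s h)) (by simp only [pvG] at *; split_ifs at * <;> omega)

theorem pvMinfold_le_init (s : List Char) (hs : List (List Char)) :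
    ∀ e : Int, hs.foldl (fun e h => min e (pvG s h)) e ≤ e := by
  induction hs with
  | nil => intro e; simp
  | cons h hs ih =>
      intro e
      calc hs.foldl (fun e h => min e (pvG s h)) (min e (pvG s h)) ≤ min e (pvG s h) := ih _
        _ ≤ e := min_le_left _ _

theorem pvMinfold_le_mem (s : List Char) (hs : List (List Char)) (h : List Char)
    (hm : h ∈ hs) : ∀ e : Int, hs.foldl (fun e h => min e (pvG s h)) e ≤ pvG s h := by
  induction hs with
  | nil => cases hm
  | cons h' hs ih =>
      intro e
      rcases List.mem_cons.mp hm with rfl | hm'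
      · calc hs.foldl (fun e h => min e (pvG s h)) (min e (pvG s h)) ≤ min e (pvG s h) :=
            pvMinfold_le_init s hs _
          _ ≤ pvG s h := min_le_right _ _
      · exact ih hm' _

theorem pvMinfold_cases (s : List Char) (hs : List (List Char)) :
    ∀ e : Int, hs.foldl (fun e h => min e (pvG s h)) e = e ∨
      ∃ h ∈ hs, hs.foldl (fun e h => min e (pvG s h)) e = pvG s h := by
  induction hs with
  | nil => intro e; left; rfl
  | cons h hs ih =>
      intro e
      rcases ih (min e (pvG s h)) with heq | ⟨h', hm, heq'⟩
      · by_cases hc : pvG s h ≤ e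
        · right
          refine ⟨h, by simp, ?_⟩
          simp only [List.foldl_cons, heq]
          omega
        · left
          simp only [List.foldl_cons, heq]
          omega
      · right
        exact ⟨h', List.mem_cons_of_mem _ hm, by simpa using heq'⟩

theorem pvPrefix_drop_infix (h s : List Char) (j : Nat) (hp : h <+: s.drop j) :
    h <:+: s :=
  hp.isInfix.trans (List.drop_suffix j s).isInfix

theorem pvFold_eq_scan (s : List Char) (hs : List (List Char)) :
    hs.foldl (fun e h =>
        if PySem.Chars.find s h ≠ -1 ∧ PySem.Chars.find s h < e then PySem.Chars.find s h else e)
      ((s.length : Int))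
    = ((pvScan hs s : Nat) : Int) := by
  rw [pvFold_eq_minfold s hs _ le_rfl]
  have hscan_len := pvScan_le_length hs s
  apply le_antisymm
  · rcases pvScan_spec_mem hs s with hlen | ⟨h, hm, hp⟩
    · rw [hlen]; exact pvMinfold_le_init s hs _
    · have hinf : h <:+: s := pvPrefix_drop_infix h s _ hp
      have hne : PySem.Chars.find s h ≠ -1 := (PySem.Chars.find_ne_neg_one_iff s h).mpr hinf
      have h0 : 0 ≤ PySem.Chars.find s h := by
        have := PySem.Chars.neg_one_le_find s h; omega
      have hmin := (PySem.Chars.find_spec (s := s) (sub := h) h0).2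
      have hfle : (PySem.Chars.find s h).toNat ≤ pvScan hs s := by
        by_contra hlt
        exact hmin _ (by omega) hp
      have hg : pvG s h ≤ ((pvScan hs s : Nat) : Int) := by
        simp only [pvG, hne, if_false]; omega
      exact le_trans (pvMinfold_le_mem s hs h hm _) hg
  · rcases pvMinfold_cases s hs ((s.length : Int)) with heq | ⟨h, hm, heq⟩
    · rw [heq]; omega
    · rw [heq]
      simp only [pvG]
      split_ifs with hne
      · omega
      · have h0 : 0 ≤ PySem.Chars.find s h := by
          have := PySem.Chars.neg_one_le_find s h; omega
        have hpre := (PySem.Chars.find_spec (s := s) (sub := h) h0).1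
        have := pvScan_min hs s (PySem.Chars.find s h).toNat h hm hpre
        omega

theorem pvLower_drop (t : List Char) (k : Nat) :
    PySem.Chars.lower (t.drop k) = (PySem.Chars.lower t).drop k := by
  show (t.drop k).map PySem.Chars.lowerChar = (t.map PySem.Chars.lowerChar).drop k
  simp [List.map_drop]

theorem pvLower_length (t : List Char) :
    (PySem.Chars.lower t).length = t.length := by
  show (t.map PySem.Chars.lowerChar).length = t.length
  simp

-- ===== VERDICT (by name: the statement is the Claim_ definition above) =====
theorem extract_abstract_from_text_py_spec : Claim_equal_extract_abstract_from_text_py := by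
  intro text _
  unfold Spec_extract_abstract_from_text_py
  simp only [extract_abstract_from_text_py, extract_abstract_from_text_py_alt]
  by_cases hf : PySem.Chars.find (PySem.Chars.lower text.toList) "abstract".toList = -1
  · rw [if_neg (fun h : _ ≠ (-1 : Int) => h hf), if_pos hf]
  · rw [if_pos hf, if_neg hf]
    have h0 : 0 ≤ PySem.Chars.find (PySem.Chars.lower text.toList) "abstract".toList := by
      have := PySem.Chars.neg_one_le_find (PySem.Chars.lower text.toList) "abstract".toList
      omega
    rw [PySem.List.slice_from _ h0, PySem.List.slice_from _ h0]
    rw [pvLower_drop]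
    rw [show ((text.toList.drop (PySem.Chars.find (PySem.Chars.lower text.toList)
          "abstract".toList).toNat).length : Int)
        = (((PySem.Chars.lower text.toList).drop (PySem.Chars.find (PySem.Chars.lower text.toList)
          "abstract".toList).toNat).length : Int) by
      simp [pvLower_length]]
    rw [pvFold_eq_scan]
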